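-- pv_equiv track=rewrite | github.com/fortra/impacket | impacket/structure.py | parse_bitmask
-- ===== SOURCE A (Python) =====
-- def parse_bitmask(dict, value):
--     ret = ''
--
--     for i in range(0, 31):
--         flag = 1 << i
--
--         if value & flag == 0:
--             continue
--
--         if flag in dict:
--             ret += '%s | ' % dict[flag]
--         else:
--             ret += "0x%.8X | " % flag
--
--     if len(ret) == 0:
--         return '0'
--     else:
--         return ret[:-3]
-- ===== SOURCE B (Python) =====
-- def parse_bitmask(dict, value):
--     def go(m, base, width):
--         # divide and conquer: split the width-bit word m into halves,
--         # format each half recursively, keep ascending order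
--         if m == 0:
--             return []
--         if width <= 1:
--             flag = 1 << base
--             return [dict[flag] if flag in dict else '0x%.8X' % flag]
--         half = width // 2
--         return go(m % (1 << half), base, half) + go(m >> half, base + half, width - half)
--     parts = go(value & 0x7FFFFFFF, 0, 31)
--     return ' | '.join(parts) if parts else '0'
-- ===== Notes on version B (the rewrite author's own statement) =====
-- stated objective: alternative
-- what changed: B replaces A's linear range(0,31) scan with trailing-separator trimming by a divide-and-conquer recursion that masks the value to 31 bits, recursively splits the word into low/high halves down to single bits (visiting set bits in ascending order), collects the formatted parts in lists and assembles them with ' | '.join.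
import Mathlib
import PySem

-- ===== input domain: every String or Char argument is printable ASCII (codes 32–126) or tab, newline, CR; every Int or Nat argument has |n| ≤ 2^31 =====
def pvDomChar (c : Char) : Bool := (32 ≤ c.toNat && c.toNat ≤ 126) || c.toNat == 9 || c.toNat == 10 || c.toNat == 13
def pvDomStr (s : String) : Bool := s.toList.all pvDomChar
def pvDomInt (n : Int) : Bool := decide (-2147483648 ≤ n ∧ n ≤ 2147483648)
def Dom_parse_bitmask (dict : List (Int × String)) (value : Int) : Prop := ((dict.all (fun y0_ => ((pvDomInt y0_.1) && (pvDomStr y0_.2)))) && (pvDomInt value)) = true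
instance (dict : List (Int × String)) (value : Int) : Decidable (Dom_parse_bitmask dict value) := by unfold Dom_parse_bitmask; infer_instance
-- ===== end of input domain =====

-- B replaces the linear range(0,31) scan with trailing-separator trimming by a divide-and-conquer
-- recursion over the masked value (split the word into halves down to single bits) whose parts are
-- assembled with ' | '.join (objective: alternative).

-- shared formatting helper: '%.8X' % n, exact for 0 ≤ n < 2^32 (8 zero-padded upper-case hex digits)
def pvHexDigit (d : Nat) : Char := if d < 10 then Char.ofNat (48 + d) else Char.ofNat (55 + d)
def pvHex8 (n : Nat) : String := String.ofList ((List.range 8).map (fun k => pvHexDigit (n / 16 ^ (7 - k) % 16)))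

-- ===== PORT A =====
-- loop body of A (the two 'ret += …' branches), folded over range(0, 31)
def pvBodyA (dict : List (Int × String)) (value : Int) (ret : String) (i : Int) : String :=
  let flag : Int := 1 <<< i.toNat
  if PySem.Int.band value flag = 0 then ret
  else
    match dict.lookup flag with
    | some s => ret ++ (s ++ " | ")
    | none   => ret ++ ("0x" ++ pvHex8 flag.toNat ++ " | ")

def parse_bitmask (dict : List (Int × String)) (value : Int) : String :=
  let ret := (PySem.List.pyRange 0 31 1).foldl (pvBodyA dict value) ""
  if PySem.Str.len ret = 0 then "0" else PySem.Str.slice ret none (some (-3))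

-- ===== PORT B =====
-- dict[flag] if flag in dict else '0x%.8X' % flag
def pvPieceB (dict : List (Int × String)) (bit : Nat) : String :=
  let flag : Int := 1 <<< bit
  match dict.lookup flag with
  | some s => s
  | none   => "0x" ++ pvHex8 flag.toNat

-- the recursive helper go(m, base, width): split the width-bit word m into halves
def pvGoB (dict : List (Int × String)) (m : Nat) (base : Nat) (width : Nat) : List String :=
  if m = 0 then []
  else if width ≤ 1 then [pvPieceB dict base]
  else
    let half := width / 2
    pvGoB dict (m % (1 <<< half)) base half ++ pvGoB dict (m >>> half) (base + half) (width - half)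
  termination_by width
  decreasing_by
  · omega
  · omega

def parse_bitmask_alt (dict : List (Int × String)) (value : Int) : String :=
  let parts := pvGoB dict (PySem.Int.band value 2147483647).toNat 0 31
  if parts = [] then "0" else PySem.Str.join " | " parts

-- ===== PRECONDITION & SPEC =====
def Spec_parse_bitmask (dict : List (Int × String)) (value : Int) (out : String) : Prop := out = parse_bitmask_alt dict value
instance (dict : List (Int × String)) (value : Int) (out : String) : Decidable (Spec_parse_bitmask dict value out) := by unfold Spec_parse_bitmask; infer_instance

-- ===== CLAIM (what is proved, stated in full; the proofs are below) =====
def Claim_equal_parse_bitmask : Prop := ∀ (dict : List (Int × String)) (value : Int), Dom_parse_bitmask dict value → Spec_parse_bitmask dict value (parse_bitmask dict value)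

-- ===== LEMMAS AND PROOFS =====

-- A's accumulated string, as a right fold over the selected pieces
def pvCat (ps : List String) : String := ps.foldr (fun p r => (p ++ " | ") ++ r) ""

-- masking by 0x7FFFFFFF is reduction mod 2^31 (Python &, floor semantics)
lemma pv_band_mask (v : Int) : PySem.Int.band v 2147483647 = v % 2147483648 := by
  unfold PySem.Int.band
  split
  · next hv =>
    rw [if_pos (by norm_num)]
    rw [show ((2147483647 : Int)).toNat = 2 ^ 31 - 1 by decide,
      Nat.and_two_pow_sub_one_eq_mod]
    have h2 : v = (v.toNat : Int) := (Int.toNat_of_nonneg hv).symm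
    rw [h2]
    push_cast
    omega
  · next hv =>
    rw [if_pos (by norm_num)]
    rw [show ((2147483647 : Int)).toNat = 2 ^ 31 - 1 by decide,
      Nat.and_comm, Nat.and_two_pow_sub_one_eq_mod]
    have h2 : ((-v - 1).toNat : Int) = -v - 1 := Int.toNat_of_nonneg (by omega)
    push_cast
    omega

-- floor division of a negative two's-complement value by a power of two
lemma pv_ediv_pow_neg (q : Nat) (i : Nat) :
    (-(q : Int) - 1) / 2 ^ i = -((q / 2 ^ i : Nat) : Int) - 1 := by
  have hb : (q % 2 ^ i : Nat) < 2 ^ i := Nat.mod_lt _ (Nat.two_pow_pos i)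
  have hq : (q : Int) = ((2 ^ i : Nat) : Int) * ((q / 2 ^ i : Nat) : Int) + ((q % 2 ^ i : Nat) : Int) := by
    exact_mod_cast (Nat.div_add_mod q (2 ^ i)).symm
  have key : -(q : Int) - 1 =
      ((2 ^ i : Int) - 1 - ((q % 2 ^ i : Nat) : Int)) + (-(((q / 2 ^ i : Nat) : Int) + 1)) * 2 ^ i := by
    rw [hq]; push_cast; ring
  rw [key, Int.add_mul_ediv_right _ _ (by positivity),
    Int.ediv_eq_zero_of_lt (by push_cast; omega) (by push_cast; omega)]
  ring

-- A's bit test '(value & (1 << i)) == 0', as the i-th binary digit of value (floor semantics)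
lemma pv_band_pow (v : Int) (i : Nat) :
    (PySem.Int.band v ((1 <<< i : Nat) : Int) = 0) ↔ v / 2 ^ i % 2 = 0 := by
  have hsh : ((1 <<< i : Nat) : Int) = ((2 ^ i : Nat) : Int) := by
    rw [Nat.shiftLeft_eq, one_mul]
  have htn : (((2 ^ i : Nat) : Int)).toNat = 2 ^ i := Int.toNat_natCast _
  have hpos : (0:Nat) < 2 ^ i := Nat.two_pow_pos i
  have hposI : (1:Int) ≤ ((2 ^ i : Nat) : Int) := by exact_mod_cast hpos
  unfold PySem.Int.band
  rw [hsh]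
  split
  · next hv =>
    obtain ⟨V, rfl⟩ : ∃ V : Nat, v = (V : Int) := ⟨v.toNat, (Int.toNat_of_nonneg hv).symm⟩
    rw [if_pos (by positivity), htn, Int.toNat_natCast, Nat.and_two_pow]
    have hR : ((V / 2 ^ i % 2 : Nat) : Int) = (V : Int) / 2 ^ i % 2 := by
      rw [Int.natCast_emod, Int.natCast_ediv]; push_cast; ring
    rw [Nat.testBit_eq_decide_div_mod_eq, ← hR]
    rcases Nat.mod_two_eq_zero_or_one (V / 2 ^ i) with h | h <;> simp [h]
  · next hv =>
    rw [if_pos (by positivity), htn, Nat.two_pow_and]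
    obtain ⟨Q, hQ⟩ : ∃ Q : Nat, (Q : Int) = -v - 1 := ⟨(-v - 1).toNat, Int.toNat_of_nonneg (by omega)⟩
    rw [show v = -(Q : Int) - 1 by omega, pv_ediv_pow_neg,
      show (-(-(Q : Int) - 1) - 1).toNat = Q by omega,
      Nat.testBit_eq_decide_div_mod_eq]
    have hlink : ((Q / 2 ^ i : Nat) : Int) = (Q : Int) / 2 ^ i := by
      rw [Int.natCast_ediv]; push_cast; ring
    rcases Nat.mod_two_eq_zero_or_one (Q / 2 ^ i) with h | h <;>
      simp [h] <;> omega

-- below bit 31, the digits of the masked value agree with the digits of value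
lemma pv_digit_mask (v : Int) (i : Nat) (h : i < 31) :
    ((v % 2147483648).toNat / 2 ^ i % 2 = 0) ↔ v / 2 ^ i % 2 = 0 := by
  have hr0 : (0:Int) ≤ v % 2147483648 := Int.emod_nonneg v (by norm_num)
  have hsplit : v = v % 2147483648 + (v / 2147483648) * 2147483648 :=
    (Int.emod_add_ediv_mul v 2147483648).symm
  have hpow : ((2 ^ (30 - i) : Int) * 2) * 2 ^ i = 2147483648 := by
    have h1 : (2:Int) ^ (30 - i) * 2 * 2 ^ i = 2 ^ ((30 - i) + 1 + i) := by ring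
    rw [h1, show (30 - i) + 1 + i = 31 by omega]; norm_num
  have hdiv : v / 2 ^ i = v % 2147483648 / 2 ^ i + (v / 2147483648 * (2 ^ (30 - i))) * 2 := by
    calc v / 2 ^ i
        = (v % 2147483648 + (v / 2147483648 * (2 ^ (30 - i)) * 2) * 2 ^ i) / 2 ^ i := by
          rw [show (v / 2147483648 * (2 ^ (30 - i)) * 2) * 2 ^ i
              = (v / 2147483648) * ((2 ^ (30 - i) * 2) * 2 ^ i) by ring, hpow]
          exact congrArg (fun t => t / (2 ^ i : Int)) hsplit
      _ = v % 2147483648 / 2 ^ i + v / 2147483648 * (2 ^ (30 - i)) * 2 :=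
          Int.add_mul_ediv_right _ _ (by positivity)
  have hmod2 : v / 2 ^ i % 2 = v % 2147483648 / 2 ^ i % 2 := by
    rw [hdiv, Int.add_mul_emod_self_right]
  have hc : (((v % 2147483648).toNat / 2 ^ i : Nat) : Int) = v % 2147483648 / 2 ^ i := by
    rw [Int.natCast_ediv, Int.toNat_of_nonneg hr0]; push_cast; ring
  rw [hmod2]
  omega

lemma pv_foldA (d : List (Int × String)) (v : Int) (l : List Int) (s : String) :
    l.foldl (pvBodyA d v) s =
      s ++ pvCat (l.filterMap (fun i =>
        if PySem.Int.band v ((1 <<< i.toNat : Nat) : Int) = 0 then none else some (pvPieceB d i.toNat))) := by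
  induction l generalizing s with
  | nil => simp [pvCat]
  | cons i l ih =>
    rw [List.foldl_cons, ih, List.filterMap_cons]
    by_cases hb : PySem.Int.band v ((1 <<< i.toNat : Nat) : Int) = 0
    · simp only [pvBodyA, if_pos hb]
    · simp only [pvBodyA, pvPieceB, if_neg hb]
      cases hg : List.lookup (((1 <<< i.toNat : Nat) : Int)) d <;>
        simp only [pvCat, List.foldr_cons] <;>
        simp [String.append_assoc]

-- the divide-and-conquer recursion collects exactly the set bits of m, in ascending order
lemma pv_goB (d : List (Int × String)) :
    ∀ width m base, m < 2 ^ width →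
      pvGoB d m base width =
        (List.range width).filterMap (fun j =>
          if m / 2 ^ j % 2 = 1 then some (pvPieceB d (base + j)) else none) := by
  intro width
  induction width using Nat.strong_induction_on with
  | _ width ih =>
    intro m base hm
    rw [pvGoB]
    by_cases h0 : m = 0
    · subst h0; simp
    rw [if_neg h0]
    by_cases h1 : width ≤ 1
    · have hw : width = 1 := by
        rcases Nat.le_one_iff_eq_zero_or_eq_one.mp h1 with h | h
        · subst h; simp at hm; omega
        · exact h
      subst hw
      have hm1 : m = 1 := by omega
      subst hm1
      simp
    rw [if_neg h1]
    have hh1 : 1 ≤ width / 2 := by omega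
    have hhw : width / 2 < width := by omega
    have hw2 : width - width / 2 < width := by omega
    have hpos : (0:Nat) < 2 ^ (width / 2) := Nat.two_pow_pos _
    have hsh : (1 <<< (width / 2) : Nat) = 2 ^ (width / 2) := by
      rw [Nat.shiftLeft_eq, one_mul]
    have hlo : m % (1 <<< (width / 2)) < 2 ^ (width / 2) := by
      rw [hsh]; exact Nat.mod_lt _ hpos
    have hhi : m >>> (width / 2) < 2 ^ (width - width / 2) := by
      rw [Nat.shiftRight_eq_div_pow]
      rw [Nat.div_lt_iff_lt_mul hpos]
      calc m < 2 ^ width := hm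
        _ = 2 ^ (width - width / 2) * 2 ^ (width / 2) := by
            rw [← pow_add]; congr 1; omega
    show pvGoB d (m % (1 <<< (width / 2))) base (width / 2)
        ++ pvGoB d (m >>> (width / 2)) (base + width / 2) (width - width / 2)
      = _
    rw [ih _ hhw _ base hlo, ih _ hw2 _ (base + width / 2) hhi]
    have hrange : List.range width
        = List.range (width / 2) ++ (List.range (width - width / 2)).map (width / 2 + ·) := by
      rw [← List.range_add]; congr 1; omega
    rw [hrange, List.filterMap_append, List.filterMap_map]
    congr 1
    · apply List.filterMap_congr
      intro j hj
      have hjlt : j < width / 2 := List.mem_range.mp hj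
      have hdig : m % (1 <<< (width / 2)) / 2 ^ j % 2 = m / 2 ^ j % 2 := by
        have := Nat.testBit_mod_two_pow m (width / 2) j
        rw [hsh]
        simp only [Nat.testBit_eq_decide_div_mod_eq, hjlt, decide_true,
          Bool.true_and] at this
        have h1 := Nat.mod_two_eq_zero_or_one (m % 2 ^ (width / 2) / 2 ^ j)
        have h2 := Nat.mod_two_eq_zero_or_one (m / 2 ^ j)
        rcases h1 with h1 | h1 <;> rcases h2 with h2 | h2 <;> simp [h1, h2] at this ⊢
      rw [hdig]
    · apply List.filterMap_congr
      intro j _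
      have hdig : m >>> (width / 2) / 2 ^ j % 2 = m / 2 ^ (width / 2 + j) % 2 := by
        have hts : (m >>> (width / 2)).testBit j = m.testBit (width / 2 + j) := by
          simp [Nat.testBit_shiftRight]
        simp only [Nat.testBit_eq_decide_div_mod_eq] at hts
        have h1 := Nat.mod_two_eq_zero_or_one (m >>> (width / 2) / 2 ^ j)
        have h2 := Nat.mod_two_eq_zero_or_one (m / 2 ^ (width / 2 + j))
        rcases h1 with h1 | h1 <;> rcases h2 with h2 | h2 <;> simp [h1, h2] at hts ⊢
      simp only [Function.comp_apply]
      rw [hdig, Nat.add_assoc]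

lemma pv_catList (ps : List String) (hps : ps ≠ []) :
    (pvCat ps).toList =
      PySem.Chars.join (" | ".toList) (ps.map String.toList) ++ " | ".toList := by
  induction ps with
  | nil => simp at hps
  | cons p rest ih =>
    cases rest with
    | nil =>
      simp [pvCat, PySem.Chars.join_singleton, String.toList_append]
    | cons q rest' =>
      have : pvCat (p :: q :: rest') = (p ++ " | ") ++ pvCat (q :: rest') := rfl
      rw [List.map_cons, List.map_cons] at *
      rw [this]
      rw [PySem.Chars.join_cons_cons]
      rw [String.toList_append, String.toList_append, ih (by simp)]
      simp [List.append_assoc]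

-- ===== VERDICT (by name: the statement is the Claim_ definition above) =====
theorem parse_bitmask_spec : Claim_equal_parse_bitmask := by
  intro d v _
  simp only [Spec_parse_bitmask, parse_bitmask, parse_bitmask_alt]
  have hmask := pv_band_mask v
  set n : Nat := (PySem.Int.band v 2147483647).toNat with hn
  have hn' : n = (v % 2147483648).toNat := by rw [hn, hmask]
  have hvm : (0:Int) ≤ v % 2147483648 := Int.emod_nonneg v (by norm_num)
  have hvm2 : v % 2147483648 < 2147483648 := Int.emod_lt_of_pos v (by norm_num)
  have hnlt : n < 2 ^ 31 := by
    have : n < 2147483648 := by rw [hn']; omega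
    omega
  have hrange : PySem.List.pyRange 0 31 1 = (List.range 31).map Int.ofNat := by decide
  rw [hrange, pv_foldA, String.empty_append, List.filterMap_map,
    pv_goB d 31 n 0 hnlt]
  simp only [Nat.zero_add]
  have hsel : ∀ j ∈ List.range 31,
      ((fun i : Int =>
          if PySem.Int.band v ((1 <<< i.toNat : Nat) : Int) = 0 then none
          else some (pvPieceB d i.toNat)) ∘ Int.ofNat) j
        = (fun j : Nat => if n / 2 ^ j % 2 = 1 then some (pvPieceB d j) else none) j := by
    intro j hj
    have hj31 : j < 31 := List.mem_range.mp hj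
    have h1 := pv_band_pow v j
    have h2 := pv_digit_mask v j hj31
    simp only [Function.comp_apply, Int.ofNat_eq_natCast, Int.toNat_natCast]
    by_cases hb : PySem.Int.band v ((1 <<< j : Nat) : Int) = 0
    · have hd0 : n / 2 ^ j % 2 = 0 := by rw [hn']; exact h2.mpr (h1.mp hb)
      rw [if_pos hb, if_neg (by omega)]
    · have hd1 : n / 2 ^ j % 2 = 1 := by
        have hne : ¬((v % 2147483648).toNat / 2 ^ j % 2 = 0) :=
          fun hc => hb (h1.mpr (h2.mp hc))
        rw [hn'] at *
        omega
      rw [if_neg hb, if_pos hd1]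
  rw [List.filterMap_congr hsel]
  by_cases hps : (List.range 31).filterMap
      (fun j : Nat => if n / 2 ^ j % 2 = 1 then some (pvPieceB d j) else none) = []
  · rw [hps]
    norm_num [pvCat, PySem.Str.len_eq]
  · have hlen : (pvCat ((List.range 31).filterMap
        (fun j : Nat => if n / 2 ^ j % 2 = 1 then some (pvPieceB d j) else none))).toList.length
        = (PySem.Chars.join (" | ".toList) (((List.range 31).filterMap
            (fun j : Nat => if n / 2 ^ j % 2 = 1 then some (pvPieceB d j) else none)).map
              String.toList)).length + 3 := by
      rw [pv_catList _ hps, List.length_append]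
      rfl
    rw [if_neg hps, PySem.Str.len_eq, if_neg (by
      rw [hlen]; intro hc; omega)]
    refine String.toList_inj.mp ?_
    rw [PySem.Str.toList_slice, PySem.Chars.slice_eq_listSlice,
      PySem.List.slice_to_neg_ofNat _ 3 (by norm_num),
      pv_catList _ hps, PySem.Str.toList_join,
      List.length_append, show (" | ".toList).length = 3 from rfl,
      Nat.add_sub_cancel]
    exact List.take_left
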